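-- pv_equiv track=rewrite | github.com/radeklat/words-to-regular-expression | src/prefix_tree/letter_range_utils.py | collapse_letter_ranges
-- ===== SOURCE A (Python) =====
-- from typing import List
--
-- _SQUARE_BRACKET_ESCAPABLES = {'[', ']', '\\'}
--
-- def escape_character_for_square_brackets(character: str) -> str:
--     return '\\' + character if character in _SQUARE_BRACKET_ESCAPABLES else character
--
-- def _formatted_letter_range(first_letter: str, last_letter: str) -> List[str]:
--     if first_letter != last_letter:
--         if ord(first_letter) + 1 < ord(last_letter):
--             return [first_letter + '-' + last_letter]
--
--         return [first_letter, last_letter]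
--
--     return [last_letter]
--
-- def _is_next_letter(first_letter: str, second_letter: str) -> bool:
--     if first_letter is None or second_letter is None:
--         return False
--
--     return ord(first_letter) + 1 == ord(second_letter)
--
-- _STATE_NO_RANGE = 1
--
-- _STATE_RANGE_START = 2
--
-- _STATE_IN_RANGE = 3
--
-- def collapse_letter_ranges(letters: List[str]) -> List[str]:
--     if len(letters) == 1:
--         return [escape_character_for_square_brackets(letters[0])]
--
--     # Make hyphen first in the list, if present
--     letters.sort(key=lambda character: -1 if character == '-' else ord(character))
--     letters_out = []
--     state = _STATE_NO_RANGE
--     first_letter = None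
--     previous_letter = None
--     last_index = len(letters)
--
--     for index, current_letter in enumerate(letters, 1):
--         if state == _STATE_NO_RANGE:
--             if current_letter.isalnum():
--                 state = _STATE_RANGE_START
--                 first_letter = current_letter
--             else:
--                 letters_out.append(escape_character_for_square_brackets(current_letter))
--
--         elif state == _STATE_RANGE_START:
--             if not current_letter.isalnum():
--                 state = _STATE_NO_RANGE
--                 letters_out.append(first_letter)
--                 letters_out.append(escape_character_for_square_brackets(current_letter))
--             elif _is_next_letter(previous_letter, current_letter):
--                 state = _STATE_IN_RANGE
--             else:
--                 letters_out.append(first_letter)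
--                 first_letter = current_letter
--
--         elif state == _STATE_IN_RANGE:
--             if not current_letter.isalnum():
--                 state = _STATE_NO_RANGE
--                 letters_out.extend(_formatted_letter_range(first_letter, previous_letter))
--                 letters_out.append(escape_character_for_square_brackets(current_letter))
--             elif not _is_next_letter(previous_letter, current_letter):
--                 state = _STATE_RANGE_START
--                 letters_out.extend(_formatted_letter_range(first_letter, previous_letter))
--                 first_letter = current_letter
--
--         if index == last_index:
--             if state == _STATE_RANGE_START:
--                 letters_out.append(current_letter)
--             elif state == _STATE_IN_RANGE:
--                 letters_out.extend(_formatted_letter_range(first_letter, current_letter))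
--
--         previous_letter = current_letter
--
--     return letters_out
-- ===== SOURCE B (Python) =====
-- # Two staged passes instead of a state machine: first group the sorted letters
-- # into maximal consecutive alphanumeric runs (and lone non-alphanumerics), then
-- # format every group.  Sorts `letters` in place, like the original.
-- from typing import List, Optional, Tuple
--
-- _SQUARE_BRACKET_ESCAPABLES = {'[', ']', '\\'}
--
--
-- def escape_character_for_square_brackets(character: str) -> str:
--     return '\\' + character if character in _SQUARE_BRACKET_ESCAPABLES else character
--
--
-- def _format_group(first: str, last: Optional[str]) -> List[str]:
--     if last is None:
--         return [escape_character_for_square_brackets(first)]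
--     if first == last:
--         return [first]
--     if ord(last) - ord(first) == 1:
--         return [first, last]
--     return [first + '-' + last]
--
--
-- def collapse_letter_ranges(letters: List[str]) -> List[str]:
--     if len(letters) == 1:
--         return [escape_character_for_square_brackets(letters[0])]
--
--     letters.sort(key=lambda character: -1 if character == '-' else ord(character))
--
--     # Pass 1: group into (first, last) alnum runs; a lone symbol is (symbol, None).
--     groups: List[Tuple[str, Optional[str]]] = []
--     run: Optional[Tuple[str, str]] = None
--     for letter in letters:
--         if not letter.isalnum():
--             if run is not None:
--                 groups.append(run)
--                 run = None
--             groups.append((letter, None))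
--         elif run is not None and ord(run[1]) + 1 == ord(letter):
--             run = (run[0], letter)
--         else:
--             if run is not None:
--                 groups.append(run)
--             run = (letter, letter)
--     if run is not None:
--         groups.append(run)
--
--     # Pass 2: format each group.
--     out: List[str] = []
--     for first, last in groups:
--         out.extend(_format_group(first, last))
--     return out
-- ===== Notes on version B (the rewrite author's own statement) =====
-- stated objective: simpler
-- what changed: Replaces the 3-state FSM with interleaved flushing by two staged passes: one pass groups the sorted letters into maximal consecutive alphanumeric runs (lone symbols as singleton groups), a second pass formats each group; Pre_ excludes only inputs where A raises (a list of length != 1 containing a string that is not a single character makes ord() in the sort key raise TypeError).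
import Mathlib
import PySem

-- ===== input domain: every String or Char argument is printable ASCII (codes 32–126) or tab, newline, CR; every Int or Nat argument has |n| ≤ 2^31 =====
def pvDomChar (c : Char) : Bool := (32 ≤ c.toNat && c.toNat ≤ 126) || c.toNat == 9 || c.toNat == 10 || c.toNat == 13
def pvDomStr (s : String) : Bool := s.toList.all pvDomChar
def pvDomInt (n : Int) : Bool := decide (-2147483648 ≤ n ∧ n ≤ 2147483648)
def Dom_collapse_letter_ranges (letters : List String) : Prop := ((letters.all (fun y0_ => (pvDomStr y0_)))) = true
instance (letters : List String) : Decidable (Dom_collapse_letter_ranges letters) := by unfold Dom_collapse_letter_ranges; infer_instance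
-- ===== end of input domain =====

-- B replaces A's 3-state FSM by two staged passes (group runs, then format them);
-- both Pythons sort `letters` in place — the equivalence proved here is about the return value.


-- ===== PORT A =====
-- Python ord(s) for a single-character string; a non-single-character argument raises
-- TypeError in Python (excluded by Pre_), here it returns 0.
def pyOrd (s : String) : Int :=
  match s.toList with
  | [c] => (c.toNat : Int)
  | _ => 0

-- escape_character_for_square_brackets (shared, letter for letter, by both Python sources)
def clr_escape (character : String) : String :=
  if character = "[" ∨ character = "]" ∨ character = "\\" then "\\" ++ character else character

-- _formatted_letter_range
def clr_fmtRange (first_letter last_letter : String) : List String :=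
  if first_letter ≠ last_letter then
    if pyOrd first_letter + 1 < pyOrd last_letter then [first_letter ++ "-" ++ last_letter]
    else [first_letter, last_letter]
  else [last_letter]

-- _is_next_letter
def clr_isNext (first_letter second_letter : Option String) : Bool :=
  match first_letter, second_letter with
  | some x, some y => pyOrd x + 1 == pyOrd y
  | _, _ => false

-- the sort key: hyphen first
def clr_key (character : String) : Int := if character = "-" then -1 else pyOrd character

-- one iteration of A's for-loop; state ∈ {1,2,3} = NO_RANGE/RANGE_START/IN_RANGE;
-- first_letter is only read in states 2 and 3, where it is never `none` (the `.getD ""`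
-- transcribes Python's plain use of the variable there).
def clrA_step (lastIndex : Int)
    (st : Int × Option String × Option String × List String)
    (ic : Int × String) : Int × Option String × Option String × List String :=
  match st, ic with
  | (state, first, prev, out), (index, current) =>
    let (state, first, out) :=
      if state = 1 then
        if PySem.Str.strIsalnum current then (2, some current, out)
        else (state, first, out ++ [clr_escape current])
      else if state = 2 then
        if ¬ PySem.Str.strIsalnum current then
          (1, first, out ++ [first.getD ""] ++ [clr_escape current])
        else if clr_isNext prev (some current) then (3, first, out)
        else (state, some current, out ++ [first.getD ""])
      else
        if ¬ PySem.Str.strIsalnum current then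
          (1, first, out ++ clr_fmtRange (first.getD "") (prev.getD "") ++ [clr_escape current])
        else if ¬ clr_isNext prev (some current) then
          (2, some current, out ++ clr_fmtRange (first.getD "") (prev.getD ""))
        else (state, first, out)
    let out :=
      if index = lastIndex then
        if state = 2 then out ++ [current]
        else if state = 3 then out ++ clr_fmtRange (first.getD "") current
        else out
      else out
    (state, first, some current, out)

def collapse_letter_ranges (letters : List String) : List String :=
  if letters.length = 1 then [clr_escape (PySem.List.pyGetD letters 0 "")]
  else
    let letters := PySem.List.sorted letters clr_key false
    let lastIndex : Int := letters.length
    let fin := (PySem.List.enumerate letters 1).foldl (clrA_step lastIndex) (1, none, none, [])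
    fin.2.2.2

-- ===== PORT B =====
-- _format_group
def clrB_fmtGroup (g : String × Option String) : List String :=
  match g with
  | (first, none) => [clr_escape first]
  | (first, some last) =>
    if first = last then [first]
    else if pyOrd last - pyOrd first = 1 then [first, last]
    else [first ++ "-" ++ last]

-- pass 1, one iteration: extend the open run, or close it and emit groups
def clrB_step (st : List (String × Option String) × Option (String × String))
    (letter : String) : List (String × Option String) × Option (String × String) :=
  match st with
  | (groups, run) =>
    if ¬ PySem.Str.strIsalnum letter then
      ((match run with | some r => groups ++ [(r.1, some r.2)] | none => groups) ++ [(letter, none)],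
       none)
    else
      match run with
      | some r =>
        if pyOrd r.2 + 1 = pyOrd letter then (groups, some (r.1, letter))
        else (groups ++ [(r.1, some r.2)], some (letter, letter))
      | none => (groups, some (letter, letter))

def collapse_letter_ranges_alt (letters : List String) : List String :=
  if letters.length = 1 then [clr_escape (PySem.List.pyGetD letters 0 "")]
  else
    let letters := PySem.List.sorted letters clr_key false
    let st := letters.foldl clrB_step ([], none)
    let groups := match st.2 with | some r => st.1 ++ [(r.1, some r.2)] | none => st.1
    groups.foldl (fun out g => out ++ clrB_fmtGroup g) []

-- ===== PRECONDITION & SPEC =====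
-- Pre_ excludes exactly the inputs where A raises: for a list of length ≠ 1, the sort
-- key calls ord() on every element, which raises TypeError unless every element is a
-- single character.
def Pre_collapse_letter_ranges (letters : List String) : Prop :=
  letters.length = 1 ∨ ∀ s ∈ letters, s.toList.length = 1
instance (letters : List String) : Decidable (Pre_collapse_letter_ranges letters) := by
  unfold Pre_collapse_letter_ranges; infer_instance

def pvWitness_collapse_letter_ranges : List String := ["b", "a", "-", "c", "["]

def Spec_collapse_letter_ranges (letters : List String) (out : List String) : Prop :=
  out = collapse_letter_ranges_alt letters
instance (letters : List String) (out : List String) :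
    Decidable (Spec_collapse_letter_ranges letters out) := by
  unfold Spec_collapse_letter_ranges; infer_instance

-- ===== CLAIM =====
def Claim_equal_collapse_letter_ranges : Prop :=
  ∀ (letters : List String), Dom_collapse_letter_ranges letters →
    Pre_collapse_letter_ranges letters →
    Spec_collapse_letter_ranges letters (collapse_letter_ranges letters)

-- ===== LEMMAS AND PROOFS =====

-- close the open run of a pass-1 state
def closeRun (st : List (String × Option String) × Option (String × String)) :
    List (String × Option String) :=
  match st.2 with | some r => st.1 ++ [(r.1, some r.2)] | none => st.1

-- the invariant tying A's FSM registers to B's open run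
def RelSt (state : Int) (first prev : Option String) (run : Option (String × String)) : Prop :=
  (state = 1 ∧ run = none) ∨
  (state = 2 ∧ ∃ f, first = some f ∧ prev = some f ∧ run = some (f, f)) ∨
  (state = 3 ∧ ∃ f l, first = some f ∧ prev = some l ∧ run = some (f, l) ∧ pyOrd f < pyOrd l)

lemma fmt_eq (f l : String) (h : pyOrd f < pyOrd l) :
    clr_fmtRange f l = clrB_fmtGroup (f, some l) := by
  have hne : f ≠ l := by rintro rfl; exact lt_irrefl _ h
  simp only [clr_fmtRange, clrB_fmtGroup, hne, ne_eq, not_false_iff, if_true, if_false]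
  split_ifs with h1 h2 h2 <;> first | rfl | omega

-- clrB_step only appends to the group list
lemma clrB_step_factor (gs : List (String × Option String)) (run : Option (String × String))
    (x : String) :
    clrB_step (gs, run) x = (gs ++ (clrB_step ([], run) x).1, (clrB_step ([], run) x).2) := by
  cases run <;> by_cases hx : PySem.Chars.strIsalnum x.toList = true <;>
    simp [clrB_step, hx] <;> (try split_ifs) <;> simp

lemma clrB_prefix : ∀ (rest : List String) (gs : List (String × Option String))
    (run : Option (String × String)),
    rest.foldl clrB_step (gs, run) =
      (gs ++ (rest.foldl clrB_step ([], run)).1, (rest.foldl clrB_step ([], run)).2) := by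
  intro rest
  induction rest with
  | nil => intro gs run; simp
  | cons x rest ih =>
    intro gs run
    rw [List.foldl_cons, List.foldl_cons, clrB_step_factor gs run x]
    rcases h : clrB_step ([], run) x with ⟨d, r'⟩
    rw [ih (gs ++ d) r', ih d r']
    simp

lemma closeRun_append (gs d : List (String × Option String)) (r : Option (String × String)) :
    closeRun (gs ++ d, r) = gs ++ closeRun (d, r) := by
  cases r <;> simp [closeRun]

lemma mainA : ∀ (rest : List String) (s L state : Int) (first prev : Option String)
    (out : List String) (run : Option (String × String)),
    rest ≠ [] → L = s + rest.length - 1 → RelSt state first prev run →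
    ((PySem.List.enumerate rest s).foldl (clrA_step L) (state, first, prev, out)).2.2.2
      = out ++ (closeRun (rest.foldl clrB_step ([], run))).flatMap clrB_fmtGroup := by
  intro rest
  induction rest with
  | nil => intro _ _ _ _ _ _ _ h; exact absurd rfl h
  | cons x rest ih =>
    intro s L state first prev out run _ hL hrel
    rw [PySem.List.enumerate_cons, List.foldl_cons, List.foldl_cons]
    by_cases hrest : rest = []
    · -- x is the last element: the flush at index == lastIndex fires
      subst hrest
      have hsL : s = L := by simp at hL; omega
      rcases hrel with ⟨h1, hrun⟩ | ⟨h2, f, hf, hp, hrun⟩ | ⟨h3, f, l, hf, hp, hrun, hlt⟩ <;>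
        subst hrun <;> by_cases hx : PySem.Chars.strIsalnum x.toList = true
      · subst h1
        simp [clrA_step, clrB_step, closeRun, clrB_fmtGroup, hx, hsL]
      · subst h1
        simp [clrA_step, clrB_step, closeRun, clrB_fmtGroup, hx, hsL]
      · subst h2 hf hp
        by_cases hn : pyOrd f + 1 = pyOrd x
        · have := fmt_eq f x (by omega)
          simp [clrA_step, clrB_step, closeRun, clr_isNext, hx, hn, hsL, this]
        · simp [clrA_step, clrB_step, closeRun, clrB_fmtGroup, clr_isNext, hx, hn, hsL]
      · subst h2 hf hp
        simp [clrA_step, clrB_step, closeRun, clrB_fmtGroup, hx, hsL]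
      · subst h3 hf hp
        by_cases hn : pyOrd l + 1 = pyOrd x
        · have := fmt_eq f x (by omega)
          simp [clrA_step, clrB_step, closeRun, clr_isNext, hx, hn, hsL, this]
        · have := fmt_eq f l hlt
          simp [clrA_step, clrB_step, closeRun, clrB_fmtGroup, clr_isNext, hx, hn, hsL, this]
      · subst h3 hf hp
        have := fmt_eq f l hlt
        simp [clrA_step, clrB_step, closeRun, clrB_fmtGroup, hx, hsL, this]
    · -- not the last element
      have hlen : 0 < rest.length := List.length_pos_of_ne_nil hrest
      have hsL : ¬ (s = L) := by simp at hL; omega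
      have hL' : L = (s + 1) + rest.length - 1 := by simp at hL ⊢; omega
      rw [clrB_prefix rest]
      rcases hq : rest.foldl clrB_step ([], (clrB_step ([], run) x).2) with ⟨G, R⟩
      rcases hrel with ⟨h1, hrun⟩ | ⟨h2, f, hf, hp, hrun⟩ | ⟨h3, f, l, hf, hp, hrun, hlt⟩ <;>
        subst hrun <;> by_cases hx : PySem.Chars.strIsalnum x.toList = true
      · subst h1
        rw [show clrA_step L (1, first, prev, out) (s, x)
              = (2, some x, some x, out) by simp [clrA_step, hx, hsL],
            ih (s+1) L 2 (some x) (some x) out (some (x, x)) hrest hL'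
              (Or.inr (Or.inl ⟨rfl, x, rfl, rfl, rfl⟩))]
        simp [clrB_step, hx] at hq
        rw [hq]; simp [clrB_step, hx]
      · subst h1
        rw [show clrA_step L (1, first, prev, out) (s, x)
              = (1, first, some x, out ++ [clr_escape x]) by simp [clrA_step, hx, hsL],
            ih (s+1) L 1 first (some x) (out ++ [clr_escape x]) none hrest hL'
              (Or.inl ⟨rfl, rfl⟩)]
        simp [clrB_step, hx] at hq
        rw [hq, closeRun_append]
        simp [clrB_step, clrB_fmtGroup, hx]
      · subst h2 hf hp
        by_cases hn : pyOrd f + 1 = pyOrd x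
        · rw [show clrA_step L (2, some f, some f, out) (s, x)
                = (3, some f, some x, out) by simp [clrA_step, clr_isNext, hx, hn, hsL],
              ih (s+1) L 3 (some f) (some x) out (some (f, x)) hrest hL'
                (Or.inr (Or.inr ⟨rfl, f, x, rfl, rfl, rfl, by omega⟩))]
          simp [clrB_step, hx, hn] at hq
          rw [hq]; simp [clrB_step, hx, hn]
        · rw [show clrA_step L (2, some f, some f, out) (s, x)
                = (2, some x, some x, out ++ [f]) by simp [clrA_step, clr_isNext, hx, hn, hsL],
              ih (s+1) L 2 (some x) (some x) (out ++ [f]) (some (x, x)) hrest hL'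
                (Or.inr (Or.inl ⟨rfl, x, rfl, rfl, rfl⟩))]
          simp [clrB_step, hx, hn] at hq
          rw [hq, closeRun_append]
          simp [clrB_step, clrB_fmtGroup, hx, hn]
      · subst h2 hf hp
        rw [show clrA_step L (2, some f, some f, out) (s, x)
              = (1, some f, some x, out ++ [f] ++ [clr_escape x]) by
                simp [clrA_step, hx, hsL],
            ih (s+1) L 1 (some f) (some x) (out ++ [f] ++ [clr_escape x]) none hrest hL'
              (Or.inl ⟨rfl, rfl⟩)]
        simp [clrB_step, hx] at hq
        rw [hq, closeRun_append]
        simp [clrB_step, clrB_fmtGroup, hx]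
      · subst h3 hf hp
        by_cases hn : pyOrd l + 1 = pyOrd x
        · rw [show clrA_step L (3, some f, some l, out) (s, x)
                = (3, some f, some x, out) by simp [clrA_step, clr_isNext, hx, hn, hsL],
              ih (s+1) L 3 (some f) (some x) out (some (f, x)) hrest hL'
                (Or.inr (Or.inr ⟨rfl, f, x, rfl, rfl, rfl, by omega⟩))]
          simp [clrB_step, hx, hn] at hq
          rw [hq]; simp [clrB_step, hx, hn]
        · rw [show clrA_step L (3, some f, some l, out) (s, x)
                = (2, some x, some x, out ++ clr_fmtRange f l) by
                  simp [clrA_step, clr_isNext, hx, hn, hsL],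
              ih (s+1) L 2 (some x) (some x) (out ++ clr_fmtRange f l) (some (x, x)) hrest hL'
                (Or.inr (Or.inl ⟨rfl, x, rfl, rfl, rfl⟩))]
          simp [clrB_step, hx, hn] at hq
          rw [hq, closeRun_append, fmt_eq f l hlt]
          simp [clrB_step, hx, hn]
      · subst h3 hf hp
        rw [show clrA_step L (3, some f, some l, out) (s, x)
              = (1, some f, some x, out ++ clr_fmtRange f l ++ [clr_escape x]) by
                simp [clrA_step, hx, hsL],
            ih (s+1) L 1 (some f) (some x) (out ++ clr_fmtRange f l ++ [clr_escape x]) none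
              hrest hL' (Or.inl ⟨rfl, rfl⟩)]
        simp [clrB_step, hx] at hq
        rw [hq, closeRun_append, fmt_eq f l hlt]
        simp [clrB_step, clrB_fmtGroup, hx]

-- ===== VERDICT =====
theorem collapse_letter_ranges_spec : Claim_equal_collapse_letter_ranges := by
  intro letters _ _
  unfold Spec_collapse_letter_ranges collapse_letter_ranges collapse_letter_ranges_alt
  by_cases h1 : letters.length = 1
  · simp [h1]
  · simp only [h1, if_false]
    set L := PySem.List.sorted letters clr_key false with hLdef
    by_cases hnil : L = []
    · rw [hnil]
      simp [PySem.List.enumerate]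
    · rw [mainA L 1 L.length 1 none none [] none hnil (by omega) (Or.inl ⟨rfl, rfl⟩)]
      rw [PySem.List.foldl_append_eq_flatMap]
      rcases hq : L.foldl clrB_step ([], none) with ⟨G, R⟩
      cases R <;> simp [closeRun]
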